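-- pv_equiv track=rewrite | github.com/bonvech/newborn | Supervizor/grimm_device.py | get_warnings
-- ===== SOURCE A (Python) =====
-- def get_warnings(wars):
--     warning = 0
--     for war in wars:
--         warning |= war
--
--     message = ""
--     if warning & 1:
--             message += "Warning 1. Very high concentration (expected error > 5%).\n"
--     if warning & 2:
--             message += "Warning 2. NO Warmup.\n"
--     if warning & 4:
--             message += "Warning 4. NO 1-Butanol.\n"
--     if warning & 8:
--             message += "Warning 8. Low pressure.\n"
--     if warning & 16:
--             message += "Warning 16. DC < 1mV.\n"
--     if warning & 32:
--             message += "Warning 32. DC > 1V.\n"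
--     if warning & 64:
--             message += "Warning 64. Counts without flow.\n"
--     if warning & 128:
--             message += "Warning 128. Counts without laser.\n"
--     if warning & 256:
--             message += "Warning 256. (C1/C0)<0.99.\n"
--     if warning & 512:
--             message += "Warning 512. Condensate bottle full.\n"
--     if warning & 1024:
--             message += "Warning 1024. External 1-Butanol reservoir empty.\n"
--
--     return message
-- ===== SOURCE B (Python) =====
-- _TEXTS = [
--     "Very high concentration (expected error > 5%).",
--     "NO Warmup.",
--     "NO 1-Butanol.",
--     "Low pressure.",
--     "DC < 1mV.",
--     "DC > 1V.",
--     "Counts without flow.",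
--     "Counts without laser.",
--     "(C1/C0)<0.99.",
--     "Condensate bottle full.",
--     "External 1-Butanol reservoir empty.",
-- ]
--
--
-- def _emit(mask, texts, bit):
--     # Recursively peel the lowest bit off the mask; the message header
--     # "Warning <bit>. " is computed from the tracked bit value.
--     if not texts:
--         return ""
--     rest = _emit(mask >> 1, texts[1:], bit * 2)
--     if mask & 1:
--         return "Warning " + str(bit) + ". " + texts[0] + "\n" + rest
--     return rest
--
--
-- def get_warnings(wars):
--     mask = 0
--     for war in wars:
--         mask |= war
--     return _emit(mask, _TEXTS, 1)
-- ===== Notes on version B (the rewrite author's own statement) =====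
-- stated objective: alternative
-- what changed: B replaces A's eleven hard-coded branches testing fixed masks against one OR-combined value by a recursion that peels the lowest bit off the mask (mask & 1, mask >> 1) while walking a list of bare message texts, computing each 'Warning <bit>. ' header from a doubling bit counter and building the string back-to-front.
import Mathlib
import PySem

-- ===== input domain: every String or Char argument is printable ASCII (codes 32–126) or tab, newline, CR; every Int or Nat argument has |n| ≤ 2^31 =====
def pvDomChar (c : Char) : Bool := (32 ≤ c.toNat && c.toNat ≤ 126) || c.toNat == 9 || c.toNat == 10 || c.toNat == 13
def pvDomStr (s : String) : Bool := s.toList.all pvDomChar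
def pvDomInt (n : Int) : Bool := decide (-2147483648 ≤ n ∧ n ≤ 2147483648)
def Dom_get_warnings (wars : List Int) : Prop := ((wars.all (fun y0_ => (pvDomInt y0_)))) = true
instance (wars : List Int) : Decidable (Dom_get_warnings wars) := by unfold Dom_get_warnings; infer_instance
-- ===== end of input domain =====

-- B replaces A's eleven fixed-mask branches by a recursion that peels the lowest bit off the
-- OR-combined mask and computes each "Warning <bit>. " header from a doubling bit counter (objective: alternative).

-- ===== PORT A =====
def get_warnings (wars : List Int) : String :=
  let warning := wars.foldl (fun warning war => PySem.Int.bor warning war) 0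
  let message := ""
  let message := if PySem.Int.band warning 1 ≠ 0 then message ++ "Warning 1. Very high concentration (expected error > 5%).\n" else message
  let message := if PySem.Int.band warning 2 ≠ 0 then message ++ "Warning 2. NO Warmup.\n" else message
  let message := if PySem.Int.band warning 4 ≠ 0 then message ++ "Warning 4. NO 1-Butanol.\n" else message
  let message := if PySem.Int.band warning 8 ≠ 0 then message ++ "Warning 8. Low pressure.\n" else message
  let message := if PySem.Int.band warning 16 ≠ 0 then message ++ "Warning 16. DC < 1mV.\n" else message
  let message := if PySem.Int.band warning 32 ≠ 0 then message ++ "Warning 32. DC > 1V.\n" else message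
  let message := if PySem.Int.band warning 64 ≠ 0 then message ++ "Warning 64. Counts without flow.\n" else message
  let message := if PySem.Int.band warning 128 ≠ 0 then message ++ "Warning 128. Counts without laser.\n" else message
  let message := if PySem.Int.band warning 256 ≠ 0 then message ++ "Warning 256. (C1/C0)<0.99.\n" else message
  let message := if PySem.Int.band warning 512 ≠ 0 then message ++ "Warning 512. Condensate bottle full.\n" else message
  let message := if PySem.Int.band warning 1024 ≠ 0 then message ++ "Warning 1024. External 1-Butanol reservoir empty.\n" else message
  message

-- ===== PORT B =====
def pvTexts : List String :=
  [ "Very high concentration (expected error > 5%).",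
    "NO Warmup.",
    "NO 1-Butanol.",
    "Low pressure.",
    "DC < 1mV.",
    "DC > 1V.",
    "Counts without flow.",
    "Counts without laser.",
    "(C1/C0)<0.99.",
    "Condensate bottle full.",
    "External 1-Butanol reservoir empty." ]

def pvEmit (mask : Int) (texts : List String) (bit : Int) : String :=
  match texts with
  | [] => ""
  | t :: ts =>
    let rest := pvEmit (mask >>> (1:Nat)) ts (bit * 2)  -- Python `mask >> 1` (k : Nat per PySem)
    if PySem.Int.band mask 1 ≠ 0 then
      "Warning " ++ PySem.Int.toStr bit ++ ". " ++ t ++ "\n" ++ rest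
    else rest

def get_warnings_alt (wars : List Int) : String :=
  let mask := wars.foldl (fun mask war => PySem.Int.bor mask war) 0
  pvEmit mask pvTexts 1

-- ===== PRECONDITION & SPEC =====
def Spec_get_warnings (wars : List Int) (out : String) : Prop := out = get_warnings_alt wars
instance (wars : List Int) (out : String) : Decidable (Spec_get_warnings wars out) := by unfold Spec_get_warnings; infer_instance

-- ===== CLAIM (what is proved, stated in full; the proofs are below) =====
def Claim_equal_get_warnings : Prop := ∀ (wars : List Int), Dom_get_warnings wars → Spec_get_warnings wars (get_warnings wars)

-- ===== LEMMAS AND PROOFS =====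

-- The common normal form both programs are reduced to: the (bit, full message) table.
def pvWarningTable : List (Int × String) :=
  [ (1, "Warning 1. Very high concentration (expected error > 5%).\n"),
    (2, "Warning 2. NO Warmup.\n"),
    (4, "Warning 4. NO 1-Butanol.\n"),
    (8, "Warning 8. Low pressure.\n"),
    (16, "Warning 16. DC < 1mV.\n"),
    (32, "Warning 32. DC > 1V.\n"),
    (64, "Warning 64. Counts without flow.\n"),
    (128, "Warning 128. Counts without laser.\n"),
    (256, "Warning 256. (C1/C0)<0.99.\n"),
    (512, "Warning 512. Condensate bottle full.\n"),
    (1024, "Warning 1024. External 1-Butanol reservoir empty.\n") ]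

-- The table pvEmit's recursion implicitly walks, with the running bit made explicit.
def pvMkTable : List String → Int → List (Int × String)
  | [], _ => []
  | t :: ts, b => (b, "Warning " ++ PySem.Int.toStr b ++ ". " ++ t ++ "\n") :: pvMkTable ts (b * 2)

theorem pv_joinE_nil : PySem.Str.join "" ([] : List String) = "" := by
  simp [PySem.Str.join, PySem.Chars.join, List.intercalate]

theorem pv_joinE_cons (x : String) (xs : List String) :
    PySem.Str.join "" (x :: xs) = x ++ PySem.Str.join "" xs := by
  cases xs with
  | nil => simp [PySem.Str.join, PySem.Chars.join, List.intercalate]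
  | cons y ys =>
    simp only [PySem.Str.join, PySem.Chars.join, List.intercalate, List.map_cons,
      List.intersperse_cons₂, List.flatten_cons]
    rw [← String.toList_inj]; simp

-- n AND 2c reads n shifted by one against c (Nat side).
theorem pv_nat_and_two_mul (n c : Nat) : n &&& (2*c) = 2*((n >>> 1) &&& c) := by
  rw [show 2*c = c <<< 1 by simp [Nat.shiftLeft_eq, Nat.mul_comm],
      show 2*((n >>> 1) &&& c) = ((n >>> 1) &&& c) <<< 1 by simp [Nat.shiftLeft_eq, Nat.mul_comm]]
  apply Nat.eq_of_testBit_eq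
  intro i
  cases i with
  | zero => simp
  | succ j => simp [Nat.testBit_and, Nat.testBit_shiftLeft, Nat.testBit_shiftRight, Nat.add_comm]

-- Python-exact version on Int: w & (2c) = 2 * ((w >> 1) & c).
theorem pv_band_two_mul (w : Int) (c : Nat) :
    PySem.Int.band w (2*(c:Int)) = 2 * PySem.Int.band (w >>> (1:Nat)) (c:Int) := by
  cases w with
  | ofNat n =>
    show PySem.Int.band (Int.ofNat n) (2*(c:Int)) = 2 * PySem.Int.band (Int.ofNat (n >>> 1)) (c:Int)
    simp only [PySem.Int.band, Int.ofNat_eq_natCast]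
    rw [if_pos (by omega), if_pos (by omega), if_pos (by omega), if_pos (by omega)]
    rw [show ((2*(c:Int))).toNat = 2*c by omega, show ((c:Int)).toNat = c by omega,
        show ((n:Int)).toNat = n by omega, show (((n >>> 1 : Nat) : Int)).toNat = n >>> 1 by omega]
    rw [pv_nat_and_two_mul]; push_cast; ring
  | negSucc m =>
    show PySem.Int.band (Int.negSucc m) (2*(c:Int)) = 2 * PySem.Int.band (Int.negSucc (m >>> 1)) (c:Int)
    simp only [PySem.Int.band]
    rw [if_neg (by omega), if_pos (by omega), if_neg (by omega), if_pos (by omega)]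
    rw [show (-(Int.negSucc m) - 1).toNat = m by omega,
        show (-(Int.negSucc (m >>> 1)) - 1).toNat = m >>> 1 by omega,
        show ((2*(c:Int))).toNat = 2*c by omega, show ((c:Int)).toNat = c by omega]
    rw [Nat.and_comm, pv_nat_and_two_mul, Nat.and_comm (m >>> 1) c]
    have h1 : (m >>> 1) &&& c ≤ c := Nat.and_le_right
    have h2 : c &&& (m >>> 1) ≤ c := Nat.and_le_left
    rw [Nat.and_comm c (m >>> 1)]
    omega

-- Testing bit 0 of W >> k is testing bit k of W.
theorem pv_band_pow (k : Nat) : ∀ (W : Int),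
    (PySem.Int.band (W >>> k) 1 ≠ 0) ↔ (PySem.Int.band W ((2:Int)^k) ≠ 0) := by
  induction k with
  | zero =>
    intro W
    rw [show W >>> (0:Nat) = W from Int.shiftRight_zero W, pow_zero]
  | succ k ih =>
    intro W
    have hc : ((2:Int))^(k+1) = 2 * (((2^k : Nat) : Int)) := by push_cast; ring
    rw [hc, pv_band_two_mul W (2^k),
        show W >>> (k+1 : Nat) = (W >>> (1:Nat)) >>> (k:Nat) by
          rw [← Int.shiftRight_add]; norm_num [Nat.add_comm]]
    have hthis := ih (W >>> (1:Nat))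
    push_cast at hthis ⊢
    rw [hthis]
    omega

-- pvEmit on W >> k, walking texts with running bit 2^k, is the join over the selected table rows.
theorem pv_emit_join (texts : List String) : ∀ (k : Nat) (W : Int),
    pvEmit (W >>> k) texts ((2:Int)^k) =
      PySem.Str.join "" (((pvMkTable texts ((2:Int)^k)).filter
        (fun p => PySem.Int.band W p.1 != 0)).map Prod.snd) := by
  induction texts with
  | nil => intro k W; simp [pvEmit, pvMkTable, pv_joinE_nil]
  | cons t ts ih =>
    intro k W
    have hshift : (W >>> (k:Nat)) >>> (1:Nat) = W >>> ((k+1 : Nat)) := by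
      rw [← Int.shiftRight_add]
    have hpow : ((2:Int))^k * 2 = 2^(k+1) := by ring
    have hrest : pvEmit ((W >>> (k:Nat)) >>> (1:Nat)) ts ((2:Int)^k * 2) =
        PySem.Str.join "" (((pvMkTable ts ((2:Int)^k * 2)).filter
          (fun p => PySem.Int.band W p.1 != 0)).map Prod.snd) := by
      rw [hshift, hpow]; exact ih (k+1) W
    rw [pvEmit]
    simp only [pvMkTable, List.filter_cons]
    by_cases h : PySem.Int.band W ((2:Int)^k) = 0
    · rw [if_neg (by simpa [pv_band_pow k W] using h), if_neg (by simpa using h)]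
      exact hrest
    · rw [if_pos ((pv_band_pow k W).mpr h), if_pos (by simpa using h)]
      rw [List.map_cons, pv_joinE_cons, hrest]

-- A's branch chain, seen as a left fold over the table, equals the joined filter.
theorem pv_fold_eq_join (w : Int) (l : List (Int × String)) (acc : String) :
    l.foldl (fun m p => if PySem.Int.band w p.1 ≠ 0 then m ++ p.2 else m) acc
      = acc ++ PySem.Str.join "" ((l.filter (fun p => PySem.Int.band w p.1 != 0)).map Prod.snd) := by
  induction l generalizing acc with
  | nil => simp [pv_joinE_nil]
  | cons p t ih =>
    rw [List.foldl_cons, List.filter_cons]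
    by_cases h : PySem.Int.band w p.1 = 0
    · rw [if_neg (not_not_intro h), if_neg (by simp [h]), ih]
    · rw [if_pos h, if_pos (by simp [h]), List.map_cons, pv_joinE_cons, ih, String.append_assoc]

-- ===== VERDICT (by name: the statement is the Claim_ definition above) =====
theorem get_warnings_spec : Claim_equal_get_warnings := by
  intro wars _
  show get_warnings wars = get_warnings_alt wars
  unfold get_warnings get_warnings_alt
  set w := wars.foldl (fun m war => PySem.Int.bor m war) 0 with hw
  have hA : (pvWarningTable.foldl (fun m p => if PySem.Int.band w p.1 ≠ 0 then m ++ p.2 else m) "")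
      = PySem.Str.join "" ((pvWarningTable.filter (fun p => PySem.Int.band w p.1 != 0)).map Prod.snd) := by
    rw [pv_fold_eq_join]; rw [← String.toList_inj]; simp
  have hB : pvEmit w pvTexts 1 =
      PySem.Str.join "" (((pvMkTable pvTexts 1).filter (fun p => PySem.Int.band w p.1 != 0)).map Prod.snd) := by
    have := pv_emit_join pvTexts 0 w
    simpa using this
  have htab : pvMkTable pvTexts 1 = pvWarningTable := by decide
  rw [htab] at hB
  rw [hB, ← hA]
  simp [pvWarningTable, List.foldl]
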